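-- pv_equiv track=rewrite | github.com/Vigneswar-A/vigneswar-a.github.io | programming/leetcode/2070.py | isDecomposable
-- ===== SOURCE A (Python) =====
-- def isDecomposable(s: str) -> bool:
--     i = 0
--     flag = False
--
--     while i < len(s):
--         if i + 2 < len(s) and s[i] == s[i+1] == s[i+2]:
--             i += 3
--         elif i+1 < len(s) and s[i] == s[i+1]:
--             i += 2
--             flag = True
--         else:
--             return False
--
--     return flag
-- ===== SOURCE B (Python) =====
-- from itertools import groupby
--
-- def isDecomposable(s: str) -> bool:
--     has_pair = False
--     for _, g in groupby(s):
--         r = sum(1 for _ in g) % 3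
--         if r == 1:
--             return False
--         if r == 2:
--             has_pair = True
--     return has_pair
-- ===== Notes on version B (the rewrite author's own statement) =====
-- stated objective: simpler
-- what changed: Replaces A's greedy triple-first index scan over characters with an itertools.groupby pass over maximal run lengths, judging each run by its length mod 3 (1 -> False, 2 -> pair seen).
import Mathlib
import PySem

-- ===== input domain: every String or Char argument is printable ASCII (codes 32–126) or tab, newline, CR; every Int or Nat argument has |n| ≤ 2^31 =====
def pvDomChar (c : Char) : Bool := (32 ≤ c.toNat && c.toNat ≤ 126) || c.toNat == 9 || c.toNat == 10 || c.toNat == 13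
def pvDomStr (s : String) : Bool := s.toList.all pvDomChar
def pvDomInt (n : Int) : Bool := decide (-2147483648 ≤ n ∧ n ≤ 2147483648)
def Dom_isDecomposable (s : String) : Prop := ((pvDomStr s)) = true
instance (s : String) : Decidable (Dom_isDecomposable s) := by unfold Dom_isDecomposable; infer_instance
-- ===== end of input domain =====

-- B replaces A's greedy triple-first character scan with a run-lengths-then-mod-3 pass (objective: simpler); same O(n) cost.


-- ===== PORT A =====
-- A's while loop advances an index i by 3 (triple), by 2 (pair, setting flag), or returns False;
-- ported as the obvious structural recursion on the remaining suffix s[i:], same branch order, same comparisons.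
def isDecomposableLoop : List Char → Bool → Bool
  | c1 :: c2 :: c3 :: rest, flag =>
      if c1 == c2 && c2 == c3 then isDecomposableLoop rest flag            -- i + 2 < len(s) and s[i] == s[i+1] == s[i+2]
      else if c1 == c2 then isDecomposableLoop (c3 :: rest) true           -- i + 1 < len(s) and s[i] == s[i+1]
      else false
  | [c1, c2], flag =>
      if c1 == c2 then isDecomposableLoop [] true else false
  | [_], _ => false
  | [], flag => flag

def isDecomposable (s : String) : Bool := isDecomposableLoop s.toList false

-- ===== PORT B =====
-- itertools.groupby(s): the maximal run lengths, computed front-to-back.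
def runLens : List Char → List Nat
  | [] => []
  | c :: rest =>
      ((rest.takeWhile (· == c)).length + 1) :: runLens (rest.dropWhile (· == c))
termination_by l => l.length
decreasing_by
  simpa using Nat.lt_succ_of_le (List.length_dropWhile_le (· == c) rest)

-- B's for-loop over the runs: r = L % 3; r == 1 → return False; r == 2 → has_pair = True.
def evalRuns : List Nat → Bool → Bool
  | [], hasPair => hasPair
  | L :: rs, hasPair =>
      if L % 3 == 1 then false
      else evalRuns rs (hasPair || L % 3 == 2)

def isDecomposable_alt (s : String) : Bool := evalRuns (runLens s.toList) false

-- ===== PRECONDITION & SPEC =====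
def Spec_isDecomposable (s : String) (out : Bool) : Prop := out = isDecomposable_alt s
instance (s : String) (out : Bool) : Decidable (Spec_isDecomposable s out) := by unfold Spec_isDecomposable; infer_instance

-- ===== CLAIM (what is proved, stated in full; the proofs are below) =====
def Claim_equal_isDecomposable : Prop := ∀ (s : String), Dom_isDecomposable s → Spec_isDecomposable s (isDecomposable s)

-- ===== LEMMAS AND PROOFS =====

-- One maximal run: A's loop on (replicate n c ++ r), with r not starting with c, behaves as n % 3 dictates.
lemma loop_replicate (c : Char) (r : List Char) (hr : ∀ x ∈ r.head?, x ≠ c) :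
    ∀ n, 1 ≤ n → ∀ flag,
      isDecomposableLoop (List.replicate n c ++ r) flag =
        (if n % 3 == 1 then false else isDecomposableLoop r (flag || n % 3 == 2)) := by
  intro n
  induction n using Nat.strong_induction_on with
  | _ n ih =>
    intro hn flag
    match n, hn with
    | 1, _ =>
      simp only [List.replicate, List.cons_append, List.nil_append]
      match r with
      | [] => simp [isDecomposableLoop]
      | [y] =>
        have : y ≠ c := hr y (by simp)
        simp [isDecomposableLoop, this, Ne.symm this]
      | y :: z :: rest =>
        have : y ≠ c := hr y (by simp)
        simp [isDecomposableLoop, this, Ne.symm this]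
    | 2, _ =>
      simp only [List.replicate, List.cons_append, List.nil_append]
      match r with
      | [] => simp [isDecomposableLoop]
      | y :: rest =>
        have : y ≠ c := hr y (by simp)
        simp [isDecomposableLoop, this, Ne.symm this]
    | (m + 3), _ =>
      have hrep : List.replicate (m + 3) c ++ r
          = c :: c :: c :: (List.replicate m c ++ r) := by
        rw [show m + 3 = 3 + m from by omega, List.replicate_add]
        simp [List.replicate]
      rw [hrep]
      simp only [isDecomposableLoop, beq_self_eq_true, Bool.and_self, if_true]
      have hmod : (m + 3) % 3 = m % 3 := by omega
      rcases Nat.eq_zero_or_pos m with hm | hm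
      · subst hm
        simp [isDecomposableLoop]
      · rw [ih m (by omega) hm flag, hmod]

-- A's loop equals B's run-lengths evaluation; strong induction on the length of the suffix.
lemma loop_eq_evalRuns : ∀ (fuel : Nat) (cs : List Char), cs.length ≤ fuel →
    ∀ flag, isDecomposableLoop cs flag = evalRuns (runLens cs) flag := by
  intro fuel
  induction fuel with
  | zero =>
    intro cs hcs flag
    have : cs = [] := List.eq_nil_of_length_eq_zero (Nat.le_zero.mp hcs)
    subst this
    simp [isDecomposableLoop, runLens, evalRuns]
  | succ k ih =>
    intro cs hcs flag
    match cs with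
    | [] => simp [isDecomposableLoop, runLens, evalRuns]
    | c :: rest =>
      set t := rest.takeWhile (· == c) with ht
      set r := rest.dropWhile (· == c) with hrdef
      have hsplit : c :: rest = List.replicate (t.length + 1) c ++ r := by
        have htr : t = List.replicate t.length c := by
          apply List.eq_replicate_of_mem
          intro x hx
          rw [ht] at hx
          exact eq_of_beq (List.mem_takeWhile_imp (p := (· == c)) (l := rest) hx)
        calc c :: rest = c :: (t ++ r) := by rw [ht, hrdef, List.takeWhile_append_dropWhile]
          _ = List.replicate (t.length + 1) c ++ r := by
              rw [List.replicate_succ, List.cons_append]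
              nth_rewrite 1 [htr]; rfl
      have hhead : ∀ x ∈ r.head?, x ≠ c := by
        intro x hx
        have h := List.head?_dropWhile_not (· == c) rest
        rw [← hrdef] at h
        cases hr2 : r.head? with
        | none => rw [hr2] at hx; cases hx
        | some a =>
          rw [hr2] at h hx
          simp only [Option.mem_def, Option.some.injEq] at hx
          simp only [] at h
          subst hx
          simpa using h
      have hlen : r.length ≤ k := by
        have h1 : r.length ≤ rest.length := hrdef ▸ List.length_dropWhile_le _ _
        have h2 : rest.length + 1 ≤ k + 1 := by simpa using hcs
        omega
      conv_lhs => rw [hsplit]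
      rw [loop_replicate c r hhead (t.length + 1) (by omega) flag]
      have hruns : runLens (c :: rest) = (t.length + 1) :: runLens r := by
        rw [runLens]
      rw [hruns, evalRuns]
      by_cases h1 : (t.length + 1) % 3 = 1
      · simp [h1]
      · simp only [h1, beq_iff_eq, if_neg h1]
        exact ih r hlen _

-- ===== VERDICT (by name: the statement is the Claim_ definition above) =====
theorem isDecomposable_spec : Claim_equal_isDecomposable := by
  intro s _
  unfold Spec_isDecomposable isDecomposable isDecomposable_alt
  exact loop_eq_evalRuns s.toList.length s.toList le_rfl false
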